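-- pv_equiv track=rewrite | github.com/mikezyszkowski/bootcamp_08122018 | homework/zadanie3.py | czy_palindrom
-- ===== SOURCE A (Python) =====
-- def czy_palindrom(tekst):
--     tekst = "".join(tekst.lower().split())
--     lewy = 0
--     prawy = len(tekst) - 1
--
--     while prawy >= lewy:
--         if not tekst[lewy] == tekst[prawy]:
--             return False
--         lewy += 1
--         prawy -= 1
--
--     return True
-- ===== SOURCE B (Python) =====
-- def czy_palindrom(tekst):
--     tekst = "".join(tekst.lower().split())
--     return tekst == tekst[::-1]
-- ===== Notes on version B (the rewrite author's own statement) =====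
-- stated objective: idiomatic
-- what changed: The explicit two-pointer while loop with manual index bookkeeping is replaced by building the reversed string once and returning a single wholesale equality comparison.
import Mathlib
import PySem

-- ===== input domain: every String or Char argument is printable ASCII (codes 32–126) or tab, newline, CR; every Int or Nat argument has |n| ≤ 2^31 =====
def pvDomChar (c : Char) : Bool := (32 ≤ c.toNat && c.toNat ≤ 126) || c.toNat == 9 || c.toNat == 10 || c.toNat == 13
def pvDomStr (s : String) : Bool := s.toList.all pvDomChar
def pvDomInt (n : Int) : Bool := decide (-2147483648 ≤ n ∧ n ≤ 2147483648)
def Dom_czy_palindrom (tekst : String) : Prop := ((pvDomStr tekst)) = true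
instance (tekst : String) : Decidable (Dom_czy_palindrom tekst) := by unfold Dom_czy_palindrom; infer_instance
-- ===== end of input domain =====

-- B replaces A's two-pointer index loop by building the reversed normalized string and one equality comparison (idiomatic; return value only, no mutation involved).

-- ===== PORT A =====
-- the while loop of A: walks lewy up and prawy down, comparing characters
def czyLoopA (cs : List Char) (lewy prawy : Int) : Bool :=
  if prawy ≥ lewy then
    if ¬ (PySem.List.pyGet? cs lewy = PySem.List.pyGet? cs prawy) then false
    else czyLoopA cs (lewy + 1) (prawy - 1)
  else true
termination_by (prawy + 1 - lewy).toNat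
decreasing_by omega

def czy_palindrom (tekst : String) : Bool :=
  let cs := PySem.Chars.join [] (PySem.Chars.split₀ (PySem.Chars.lower tekst.toList))
  czyLoopA cs 0 ((cs.length : Int) - 1)

-- ===== PORT B =====
def czy_palindrom_alt (tekst : String) : Bool :=
  let cs := PySem.Chars.join [] (PySem.Chars.split₀ (PySem.Chars.lower tekst.toList))
  cs = cs.reverse   -- tekst == tekst[::-1] (PySem.List.slice?_none_none_neg_one)

-- ===== PRECONDITION & SPEC =====
def Spec_czy_palindrom (tekst : String) (out : Bool) : Prop := out = czy_palindrom_alt tekst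
instance (tekst : String) (out : Bool) : Decidable (Spec_czy_palindrom tekst out) := by unfold Spec_czy_palindrom; infer_instance

-- ===== CLAIM (what is proved, stated in full; the proofs are below) =====
def Claim_equal_czy_palindrom : Prop := ∀ (tekst : String), Dom_czy_palindrom tekst → Spec_czy_palindrom tekst (czy_palindrom tekst)

-- ===== LEMMAS AND PROOFS =====

theorem czyLoopA_iff (cs : List Char) (l r : Int) (hl : 0 ≤ l) :
    czyLoopA cs l r = true ↔
      ∀ i : Int, l ≤ i → i ≤ r → PySem.List.pyGet? cs i = PySem.List.pyGet? cs (l + r - i) := by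
  generalize hn : (r + 1 - l).toNat = n
  induction n using Nat.strong_induction_on generalizing l r with
  | _ n ih =>
  by_cases hlr : l ≤ r
  · rw [czyLoopA]
    simp only [ge_iff_le, if_pos hlr]
    by_cases heq : PySem.List.pyGet? cs l = PySem.List.pyGet? cs r
    · simp only [heq, not_true_eq_false]
      rw [if_neg not_false]
      rw [ih ((r - 1 + 1 - (l + 1)).toNat) (by omega) (l + 1) (r - 1) (by omega) rfl]
      constructor
      · intro h i hi1 hi2
        rcases eq_or_lt_of_le hi1 with h1 | h1
        · rw [← h1, show l + r - l = r from by omega]; exact heq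
        rcases eq_or_lt_of_le hi2 with h2 | h2
        · rw [h2, show l + r - r = l from by omega]; exact heq.symm
        · have hx := h i (by omega) (by omega)
          rwa [show l + 1 + (r - 1) - i = l + r - i from by omega] at hx
      · intro h i hi1 hi2
        have hx := h i (by omega) (by omega)
        rwa [show l + 1 + (r - 1) - i = l + r - i from by omega]
    · rw [if_pos (by exact heq)]
      constructor
      · intro h; exact absurd h (by simp)
      · intro h
        have hx := h l le_rfl hlr
        rw [show l + r - l = r from by omega] at hx
        exact absurd hx heq
  · rw [czyLoopA]
    rw [if_neg (by omega)]
    constructor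
    · intro _ i hi1 hi2; omega
    · intro _; trivial

theorem pal_iff_reverse (cs : List Char) :
    (∀ i : Int, 0 ≤ i → i ≤ (cs.length : Int) - 1 →
        PySem.List.pyGet? cs i = PySem.List.pyGet? cs ((cs.length : Int) - 1 - i)) ↔
      cs = cs.reverse := by
  constructor
  · intro h
    apply List.ext_getElem?
    intro k
    by_cases hk : k < cs.length
    · rw [List.getElem?_reverse hk]
      have hx := h (k : Int) (by omega) (by omega)
      rw [PySem.List.pyGet?_of_nonneg _ (by omega),
          PySem.List.pyGet?_of_nonneg _ (by omega)] at hx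
      rw [show ((k : Int)).toNat = k from by omega,
          show ((cs.length : Int) - 1 - k).toNat = cs.length - 1 - k from by omega] at hx
      exact hx
    · rw [List.getElem?_eq_none (by omega), List.getElem?_eq_none (by simp; omega)]
  · intro h i hi1 hi2
    rw [PySem.List.pyGet?_of_nonneg _ hi1, PySem.List.pyGet?_of_nonneg _ (by omega)]
    have hk : i.toNat < cs.length := by omega
    rw [show ((cs.length : Int) - 1 - i).toNat = cs.length - 1 - i.toNat from by omega]
    rw [← List.getElem?_reverse hk, ← h]

-- ===== VERDICT (by name: the statement is the Claim_ definition above) =====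
theorem czy_palindrom_spec : Claim_equal_czy_palindrom := by
  intro tekst _
  unfold Spec_czy_palindrom czy_palindrom czy_palindrom_alt
  set cs := PySem.Chars.join [] (PySem.Chars.split₀ (PySem.Chars.lower tekst.toList)) with hcs
  have h := (czyLoopA_iff cs 0 ((cs.length : Int) - 1) le_rfl)
  simp only [zero_add] at h
  rw [Bool.eq_iff_iff, h, decide_eq_true_iff, pal_iff_reverse]
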